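-- pv_equiv track=rewrite | github.com/GlowingScrewdriver/pyjuter | src/pyjuter/module.py | split_toplevel_stmts
-- ===== SOURCE A (Python) =====
-- from collections.abc import Iterable
--
-- def split_toplevel_stmts (source: str) -> Iterable[str]:
--     """
--     Split the provided Python source into chunks on the basis of
--     blank lines between top-level statements.
--
--     The intention is for each chunk to become a cell in a
--     Jupyter Notebook.
--
--     `source` is an iterator over lines of the source
--     (excluding newline characters).
--     An iterator over the resulting chunks (without trailing
--     newlines) is returned.
--     """
--     chunk = []
--     lastline = None
--     for line in source.split ("\n"):
--         if line:
--             if not line [0].isspace ():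
--                 # This is the beginning of a statement ... ->
--                 if lastline == "":
--                    # -> ... after a blank line
--                    yield "\n".join (chunk)
--                    chunk = []
--
--         chunk.append (line)
--         lastline = line
--
--     # Don't forget the last chunk!
--     if chunk:
--         yield "\n".join (chunk)
-- ===== SOURCE B (Python) =====
-- def split_toplevel_stmts(source):
--     lines = source.split("\n")
--     cuts = [i for i in range(1, len(lines))
--             if lines[i] and not lines[i][0].isspace() and lines[i - 1] == ""]
--     prev = 0
--     for c in cuts + [len(lines)]:
--         yield "\n".join(lines[prev:c])
--         prev = c
-- ===== Notes on version B (the rewrite author's own statement) =====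
-- stated objective: alternative
-- what changed: Replaces the stateful accumulate-and-flush generator loop with two passes: one index pass that collects chunk-boundary line indices, then a slicing pass that joins each lines[prev:c] segment.
import Mathlib
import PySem

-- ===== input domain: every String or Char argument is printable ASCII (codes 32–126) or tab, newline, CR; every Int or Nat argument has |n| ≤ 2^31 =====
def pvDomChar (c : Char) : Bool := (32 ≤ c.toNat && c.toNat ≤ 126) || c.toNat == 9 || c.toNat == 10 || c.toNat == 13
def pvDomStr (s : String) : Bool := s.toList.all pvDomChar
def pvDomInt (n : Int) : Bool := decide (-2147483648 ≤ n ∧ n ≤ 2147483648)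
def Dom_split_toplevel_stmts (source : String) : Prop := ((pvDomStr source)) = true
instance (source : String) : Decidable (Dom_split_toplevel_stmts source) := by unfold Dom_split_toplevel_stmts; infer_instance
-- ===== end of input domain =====

-- B replaces A's stateful accumulate-and-flush generator loop by an index pass collecting
-- chunk-boundary indices followed by a slicing pass (objective: alternative, same O(n) cost).

-- ===== PORT A =====
-- the loop body of A: state = (chunk, lastline, out); yields are appended to out
def pvStepA (st : List String × Option String × List String) (line : String) :
    List String × Option String × List String :=
  let chunk := st.1
  let lastline := st.2.1
  let out := st.2.2
  let p :=
    if line ≠ "" then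
      -- line[0] with line ≠ "": headD never takes its default here (exact)
      if !(PySem.Chars.isspace (line.toList.head?.getD ' ')) then
        if lastline = some "" then ([], out ++ [PySem.Str.join "\n" chunk])
        else (chunk, out)
      else (chunk, out)
    else (chunk, out)
  (p.1 ++ [line], some line, p.2)

-- A's trailing "if chunk: yield '\n'.join(chunk)"
def pvFinish (st : List String × Option String × List String) : List String :=
  if st.1 ≠ [] then st.2.2 ++ [PySem.Str.join "\n" st.1] else st.2.2

def split_toplevel_stmts (source : String) : List String :=
  -- source.split("\n"): the sep is the non-empty literal "\n", so split? is always `some` (exact)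
  let lines := (PySem.Str.split? source "\n").getD []
  pvFinish (lines.foldl pvStepA ([], none, []))

-- ===== PORT B =====
-- the loop body of B's second pass: state = (prev, out)
def pvStepB (lines : List String) (st : Int × List String) (c : Int) : Int × List String :=
  (c, st.2 ++ [PySem.Str.join "\n" (PySem.List.slice lines (some st.1) (some c))])

def split_toplevel_stmts_alt (source : String) : List String :=
  let lines := (PySem.Str.split? source "\n").getD []
  let n : Int := (lines.length : Int)
  -- lines[i] / lines[i-1] with i ∈ range(1, n) are in range, so pyGetD never defaults (exact)
  let cuts := (PySem.List.pyRange 1 n 1).filter (fun i =>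
    (PySem.List.pyGetD lines i "") != "" &&
      !(PySem.Chars.isspace ((PySem.List.pyGetD lines i "").toList.head?.getD ' ')) &&
      (PySem.List.pyGetD lines (i - 1) "") == "")
  ((cuts ++ [n]).foldl (pvStepB lines) (0, [])).2

-- ===== PRECONDITION & SPEC =====
def Spec_split_toplevel_stmts (source : String) (out : List String) : Prop := out = split_toplevel_stmts_alt source
instance (source : String) (out : List String) : Decidable (Spec_split_toplevel_stmts source out) := by unfold Spec_split_toplevel_stmts; infer_instance

-- ===== CLAIM (what is proved, stated in full; the proofs are below) =====
def Claim_equal_split_toplevel_stmts : Prop := ∀ (source : String), Dom_split_toplevel_stmts source → Spec_split_toplevel_stmts source (split_toplevel_stmts source)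

-- ===== LEMMAS AND PROOFS =====

-- chunk boundary: the current line starts a top-level statement right after a blank line
def pvCut (prev cur : String) : Bool :=
  cur != "" && !(PySem.Chars.isspace (cur.toList.head?.getD ' ')) && prev == ""

-- the grouping both programs compute, with `prev` the previously seen line; the head group
-- is the still-open continuation of the current chunk
def pvGrp (prev : String) : List String → List (List String)
  | [] => [[]]
  | x :: xs =>
    match pvGrp x xs with
    | [] => []
    | g :: gs => if pvCut prev x then [] :: (x :: g) :: gs else (x :: g) :: gs

def pvMerge (c : List String) : List (List String) → List (List String)
  | [] => []
  | g :: gs => (c ++ g) :: gs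

def pvSegs (L : List String) : Int → List Int → List (List String)
  | a, [] => [PySem.List.slice L (some a) (some (L.length : Int))]
  | a, c :: cs => PySem.List.slice L (some a) (some c) :: pvSegs L c cs

def pvCuts (L : List String) : List Int :=
  (PySem.List.pyRange 1 (L.length : Int) 1).filter (fun i =>
    pvCut (PySem.List.pyGetD L (i - 1) "") (PySem.List.pyGetD L i ""))

theorem pvGrp_ne_nil (prev : String) (L : List String) : pvGrp prev L ≠ [] := by
  induction L generalizing prev with
  | nil => simp [pvGrp]
  | cons x xs ih =>
    cases h : pvGrp x xs with
    | nil => exact absurd h (ih x)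
    | cons g gs => simp only [pvGrp, h]; split <;> simp

theorem pvSplitGo_ne_nil (sep : List Char) (fuel : Nat) (l cur : List Char)
    (acc : List (List Char)) : PySem.Chars.splitOn.go sep fuel l cur acc ≠ [] := by
  induction fuel generalizing l cur acc with
  | zero => simp [PySem.Chars.splitOn.go]
  | succ n ih =>
    cases l with
    | nil => simp [PySem.Chars.splitOn.go]
    | cons c rest =>
      simp only [PySem.Chars.splitOn.go]
      split
      · exact ih _ _ _
      · exact ih _ _ _

theorem pvLines_ne_nil (s : String) : (PySem.Str.split? s "\n").getD [] ≠ [] := by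
  unfold PySem.Str.split? PySem.Chars.split? PySem.Chars.splitOn
  simp only [show (("\n".toList : List Char).isEmpty) = false from rfl, Bool.false_eq_true,
    if_false]
  intro h
  exact pvSplitGo_ne_nil _ _ _ _ _ (by simpa using congrArg (List.map String.toList) h)

theorem pvStepA_eq (chunk : List String) (prev : String) (out : List String) (line : String) :
    pvStepA (chunk, some prev, out) line =
      if pvCut prev line then ([line], some line, out ++ [PySem.Str.join "\n" chunk])
      else (chunk ++ [line], some line, out) := by
  simp only [pvStepA, pvCut]
  by_cases h1 : line = ""
  · subst h1; simp
  · by_cases h2 : PySem.Chars.isspace (line.toList.head?.getD ' ')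
    · simp [h1, h2]
    · by_cases h3 : prev = "" <;> simp [h1, h2, h3]

theorem pvStepA_first (out : List String) (line : String) :
    pvStepA ([], none, out) line = ([line], some line, out) := by
  simp only [pvStepA]
  split_ifs <;> simp_all

-- A's accumulate-and-flush loop computes pvGrp, merged into the open chunk
theorem pvFoldA (rest : List String) (chunk : List String) (prev : String)
    (out : List String) (hc : chunk ≠ []) :
    pvFinish (rest.foldl pvStepA (chunk, some prev, out))
      = out ++ (pvMerge chunk (pvGrp prev rest)).map (PySem.Str.join "\n") := by
  induction rest generalizing chunk prev out with
  | nil => simp [pvFinish, pvGrp, pvMerge, hc]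
  | cons x xs ih =>
    simp only [List.foldl_cons, pvStepA_eq]
    rcases h : pvGrp x xs with _ | ⟨g, gs⟩
    · exact absurd h (pvGrp_ne_nil x xs)
    · by_cases hcut : pvCut prev x
      · simp only [hcut, if_true]
        rw [ih [x] x (out ++ [PySem.Str.join "\n" chunk]) (by simp)]
        simp [pvGrp, h, hcut, pvMerge]
      · simp only [hcut, Bool.false_eq_true, if_false]
        rw [ih (chunk ++ [x]) x out (by simp)]
        simp [pvGrp, h, hcut, pvMerge]

-- B's second pass computes the slices between consecutive cut points
theorem pvFoldB (lines : List String) (cs : List Int) (a : Int) (out : List String) :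
    ((cs ++ [(lines.length : Int)]).foldl (pvStepB lines) (a, out)).2
      = out ++ (pvSegs lines a cs).map (PySem.Str.join "\n") := by
  induction cs generalizing a out with
  | nil => simp [pvStepB, pvSegs]
  | cons c cs ih =>
    simp only [List.cons_append, List.foldl_cons, pvStepB]
    rw [ih]
    simp [pvSegs]

theorem pvGetD_cons_succ (x : String) (R : List String) (j : Int) (hj : 0 ≤ j) :
    PySem.List.pyGetD (x :: R) (j + 1) "" = PySem.List.pyGetD R j "" := by
  rw [PySem.List.pyGetD_of_nonneg _ _ (by omega), PySem.List.pyGetD_of_nonneg _ _ hj]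
  have : (j + 1).toNat = j.toNat + 1 := by omega
  rw [this]
  rfl

theorem pvCuts_cons2 (x y : String) (r : List String) :
    pvCuts (x :: y :: r) = (if pvCut x y then [1] else []) ++ (pvCuts (y :: r)).map (· + 1) := by
  unfold pvCuts
  have h1 : ((x :: y :: r).length : Int) = ((y :: r).length : Int) + 1 := by
    simp [List.length_cons]
  rw [h1, PySem.List.pyRange_one_cons (a := 1) (b := ((y :: r).length : Int) + 1) (by simp only [List.length_cons]; push_cast; omega)]
  have h2 : PySem.List.pyRange (1 + 1) (((y :: r).length : Int) + 1) 1
      = (PySem.List.pyRange 1 ((y :: r).length : Int) 1).map (· + 1) := by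
    rw [PySem.List.pyRange_one, PySem.List.pyRange_one]
    have h3 : (((y :: r).length : Int) - 1).toNat
        = (((y :: r).length : Int) + 1 - (1 + 1)).toNat := by omega
    rw [← h3, List.map_map]
    exact List.map_congr_left (fun k _ => by simp; ring)
  have hx : PySem.List.pyGetD (x :: y :: r) (1 - 1 : Int) "" = x := by
    norm_num [PySem.List.pyGetD_of_nonneg]
  have hy : PySem.List.pyGetD (x :: y :: r) (1 : Int) "" = y := by
    rw [show (1 : Int) = ((1 : Nat) : Int) from rfl, PySem.List.pyGetD_natCast]; rfl
  have hfil : List.filter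
      ((fun i => pvCut (PySem.List.pyGetD (x :: y :: r) (i - 1) "")
        (PySem.List.pyGetD (x :: y :: r) i "")) ∘ (fun i => i + 1))
      (PySem.List.pyRange 1 ((y :: r).length : Int) 1)
      = List.filter (fun i => pvCut (PySem.List.pyGetD (y :: r) (i - 1) "")
        (PySem.List.pyGetD (y :: r) i ""))
      (PySem.List.pyRange 1 ((y :: r).length : Int) 1) := by
    apply List.filter_congr
    intro i hi
    have hi' := (PySem.List.mem_pyRange_one).1 hi
    simp only [Function.comp_apply]
    rw [show i + 1 - 1 = (i - 1) + 1 by ring, pvGetD_cons_succ _ _ _ (by omega),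
      pvGetD_cons_succ _ _ _ (by omega)]
  simp only [List.filter_cons, h2, List.filter_map, hx, hy, hfil]
  by_cases hcy : pvCut x y = true <;> simp [hcy]

theorem pvCuts_one_le (L : List String) (c : Int) (hc : c ∈ pvCuts L) : 1 ≤ c := by
  unfold pvCuts at hc
  exact ((PySem.List.mem_pyRange_one).1 (List.mem_of_mem_filter hc)).1

theorem pvSlice_all (L : List String) :
    PySem.List.slice L (some 0) (some (L.length : Int)) = L := by
  rw [PySem.List.slice_toNat L (le_refl 0) (Int.natCast_nonneg _)]
  simp

theorem pvSlice_cons_succ (x : String) (R : List String) (a b : Int) (ha : 0 ≤ a) (hb : 0 ≤ b) :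
    PySem.List.slice (x :: R) (some (a + 1)) (some (b + 1)) = PySem.List.slice R (some a) (some b) := by
  rw [PySem.List.slice_toNat (x :: R) (show (0:Int) ≤ a + 1 by omega)
    (show (0:Int) ≤ b + 1 by omega), PySem.List.slice_toNat R ha hb]
  have h1 : (a + 1).toNat = a.toNat + 1 := by omega
  have h2 : (b + 1).toNat = b.toNat + 1 := by omega
  rw [h1, h2, List.drop_succ_cons]
  congr 1
  omega

theorem pvSlice_cons_zero (x : String) (R : List String) (b : Int) (hb : 0 ≤ b) :
    PySem.List.slice (x :: R) (some 0) (some (b + 1)) = x :: PySem.List.slice R (some 0) (some b) := by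
  rw [PySem.List.slice_toNat (x :: R) (le_refl 0) (show (0:Int) ≤ b + 1 by omega),
    PySem.List.slice_toNat R (le_refl 0) hb]
  have h1 : (b + 1).toNat = b.toNat + 1 := by omega
  rw [h1]
  simp

theorem pvSegs_shift (x : String) (R : List String) (cs : List Int) (a : Int) (ha : 0 ≤ a)
    (h : ∀ c ∈ cs, 0 ≤ c) :
    pvSegs (x :: R) (a + 1) (cs.map (· + 1)) = pvSegs R a cs := by
  induction cs generalizing a with
  | nil =>
    simp only [List.map_nil, pvSegs]
    rw [show ((x :: R).length : Int) = (R.length : Int) + 1 by simp,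
      pvSlice_cons_succ x R a _ ha (by omega)]
  | cons c cs ih =>
    simp only [List.map_cons, pvSegs]
    rw [pvSlice_cons_succ x R a c ha (h c (by simp)),
      ih c (h c (by simp)) (fun d hd => h d (by simp [hd]))]

theorem pvSlice_cons_one (x : String) (R : List String) :
    PySem.List.slice (x :: R) (some 0) (some 1) = [x] := by
  rw [PySem.List.slice_toNat (x :: R) (le_refl 0) (by omega)]
  rfl

theorem pvSegs_shift1 (x : String) (R : List String) (cs : List Int)
    (h : ∀ c ∈ cs, 0 ≤ c) :
    pvSegs (x :: R) 1 (cs.map (· + 1)) = pvSegs R 0 cs := by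
  simpa using pvSegs_shift x R cs 0 (le_refl 0) h

theorem pvSegs_cons_shift (x : String) (R : List String) (cs : List Int)
    (h : ∀ c ∈ cs, 1 ≤ c) :
    pvSegs (x :: R) 0 (cs.map (· + 1))
      = match pvSegs R 0 cs with
        | [] => []
        | g :: gs => (x :: g) :: gs := by
  cases cs with
  | nil =>
    simp only [List.map_nil, pvSegs]
    rw [show ((x :: R).length : Int) = (R.length : Int) + 1 by simp,
      pvSlice_cons_zero x R _ (by omega), pvSlice_all]
  | cons c cs =>
    simp only [List.map_cons, pvSegs]
    have hc : (1 : Int) ≤ c := h c (by simp)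
    rw [pvSlice_cons_zero x R c (by omega),
      pvSegs_shift x R cs c (by omega) (fun d hd => by have := h d (by simp [hd]); omega)]

theorem pvMain (l : String) (ls : List String) :
    pvSegs (l :: ls) 0 (pvCuts (l :: ls)) = pvMerge [l] (pvGrp l ls) := by
  induction ls generalizing l with
  | nil =>
    have hc : pvCuts [l] = [] := by
      unfold pvCuts
      rw [show (([l] : List String).length : Int) = 1 by simp,
        PySem.List.pyRange_one_eq_nil (by omega)]
      rfl
    rw [hc]
    simp only [pvSegs, pvGrp, pvMerge]
    rw [show (([l] : List String).length : Int) = (1 : Int) by simp]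
    rw [show (1 : Int) = (([l] : List String).length : Int) by simp, pvSlice_all]
    rfl
  | cons y r ih =>
    rw [pvCuts_cons2]
    rcases hg : pvGrp y r with _ | ⟨g, gs⟩
    · exact absurd hg (pvGrp_ne_nil y r)
    · have hcuts1 : ∀ c ∈ pvCuts (y :: r), (1 : Int) ≤ c := pvCuts_one_le (y :: r)
      by_cases hcut : pvCut l y
      · simp only [hcut, if_true, List.singleton_append, pvSegs]
        rw [pvSlice_cons_one,
          pvSegs_shift1 l (y :: r) _ (fun d hd => by have := hcuts1 d hd; omega)]
        rw [ih y, hg]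
        simp [pvGrp, hg, hcut, pvMerge]
      · simp only [hcut, Bool.false_eq_true, if_false, List.nil_append]
        rw [pvSegs_cons_shift l (y :: r) _ hcuts1, ih y, hg]
        simp [pvGrp, hg, hcut, pvMerge]

theorem pv_ports_eq (source : String) :
    split_toplevel_stmts source = split_toplevel_stmts_alt source := by
  unfold split_toplevel_stmts split_toplevel_stmts_alt
  obtain ⟨l, ls, hL⟩ := List.exists_cons_of_ne_nil (pvLines_ne_nil source)
  show pvFinish (((PySem.Str.split? source "\n").getD []).foldl pvStepA ([], none, []))
      = (((pvCuts ((PySem.Str.split? source "\n").getD []))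
          ++ [((((PySem.Str.split? source "\n").getD []).length : Nat) : Int)]).foldl
            (pvStepB ((PySem.Str.split? source "\n").getD [])) (0, [])).2
  rw [pvFoldB, hL, List.foldl_cons, pvStepA_first, pvFoldA ls [l] l [] (by simp), pvMain]

-- ===== VERDICT (by name: the statement is the Claim_ definition above) =====
theorem split_toplevel_stmts_spec : Claim_equal_split_toplevel_stmts := by
  intro source _
  unfold Spec_split_toplevel_stmts
  exact pv_ports_eq source
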